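-- pv_equiv track=rewrite | github.com/64octets/PythonShell | psh.py | splitOnPipeIndexes
-- ===== SOURCE A (Python) =====
-- def splitOnPipeIndexes(pipeIndexes, commands):
--     commandSequences = []
--     previousPipeIndex = 0
--     for pipeIndex in pipeIndexes:
--         commandSequence = commands[previousPipeIndex:pipeIndex]
--         commandSequences.append(commandSequence)
--         previousPipeIndex = pipeIndex + 1
--     commandSequences.append(commands[previousPipeIndex:])
--     return commandSequences
-- ===== SOURCE B (Python) =====
-- def splitOnPipeIndexes(pipeIndexes, commands):
--     tailStart = pipeIndexes[-1] + 1 if pipeIndexes else 0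
--     segments = [commands[tailStart:]]
--     rest = list(pipeIndexes)
--     while rest:
--         pipeIndex = rest.pop()
--         start = rest[-1] + 1 if rest else 0
--         segments.append(commands[start:pipeIndex])
--     segments.reverse()
--     return segments
-- ===== Notes on version B (the rewrite author's own statement) =====
-- stated objective: alternative
-- what changed: Processes the pipe indexes right-to-left by popping from a working copy, building the segment list back-to-front (tail segment first) and reversing it at the end, instead of A's left-to-right pass with a running previous-index accumulator.
import Mathlib
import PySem

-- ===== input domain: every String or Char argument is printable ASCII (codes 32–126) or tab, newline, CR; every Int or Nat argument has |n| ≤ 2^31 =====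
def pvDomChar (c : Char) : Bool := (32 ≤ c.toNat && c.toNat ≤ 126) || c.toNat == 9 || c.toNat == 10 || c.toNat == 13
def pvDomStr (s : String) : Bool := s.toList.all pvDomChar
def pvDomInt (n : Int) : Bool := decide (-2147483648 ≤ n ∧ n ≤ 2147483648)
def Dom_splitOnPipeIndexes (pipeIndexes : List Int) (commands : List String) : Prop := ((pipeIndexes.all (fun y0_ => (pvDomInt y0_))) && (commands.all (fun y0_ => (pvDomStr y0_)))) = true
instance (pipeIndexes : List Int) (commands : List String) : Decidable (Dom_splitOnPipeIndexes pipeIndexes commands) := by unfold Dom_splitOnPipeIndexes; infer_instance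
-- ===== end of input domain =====

-- B traverses the pipe indexes right-to-left (popping from a working copy), building the
-- segments back-to-front and reversing at the end, instead of A's left-to-right running-start
-- accumulator pass (objective: alternative decomposition, same cost).

-- ===== PORT A =====
def splitOnPipeIndexes (pipeIndexes : List Int) (commands : List String) : List (List String) :=
  let st := pipeIndexes.foldl
    (fun (st : List (List String) × Int) pipeIndex =>
      (st.1 ++ [PySem.List.slice commands (some st.2) (some pipeIndex)], pipeIndex + 1))
    ([], 0)
  st.1 ++ [PySem.List.slice commands (some st.2) none]

-- ===== PORT B =====
-- the while/rest.pop() loop of Source B: `rest` popped from the right = structural recursion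
-- over the reversed list; `rest[-1]` after the pop = head of the remaining reversed list
def pvLoopB (commands : List String) : List Int → List (List String) → List (List String)
  | [], segments => segments
  | pipeIndex :: rest, segments =>
      let start : Int := match rest.head? with | some q => q + 1 | none => 0
      pvLoopB commands rest (segments ++ [PySem.List.slice commands (some start) (some pipeIndex)])

def splitOnPipeIndexes_alt (pipeIndexes : List Int) (commands : List String) : List (List String) :=
  let tailStart : Int := match pipeIndexes.getLast? with | some p => p + 1 | none => 0
  let segments := [PySem.List.slice commands (some tailStart) none]
  let segments := pvLoopB commands pipeIndexes.reverse segments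
  segments.reverse

-- ===== PRECONDITION & SPEC =====
def Spec_splitOnPipeIndexes (pipeIndexes : List Int) (commands : List String) (out : List (List String)) : Prop := out = splitOnPipeIndexes_alt pipeIndexes commands
instance (pipeIndexes : List Int) (commands : List String) (out : List (List String)) : Decidable (Spec_splitOnPipeIndexes pipeIndexes commands out) := by unfold Spec_splitOnPipeIndexes; infer_instance

-- ===== CLAIM (what is proved, stated in full; the proofs are below) =====
def Claim_equal_splitOnPipeIndexes : Prop := ∀ (pipeIndexes : List Int) (commands : List String), Dom_splitOnPipeIndexes pipeIndexes commands → Spec_splitOnPipeIndexes pipeIndexes commands (splitOnPipeIndexes pipeIndexes commands)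

-- ===== LEMMAS AND PROOFS =====

-- common semantic object: running A's loop from start `d` yields (inner slices, final start)
def pvRun (cmds : List String) (d : Int) : List Int → List (List String) × Int
  | [] => ([], d)
  | p :: rest =>
      let r := pvRun cmds (p + 1) rest
      (PySem.List.slice cmds (some d) (some p) :: r.1, r.2)

-- A's foldl state equals pvRun
lemma foldA_eq_run (cmds : List String) (pis : List Int) (acc : List (List String)) (d : Int) :
    pis.foldl
      (fun (st : List (List String) × Int) p =>
        (st.1 ++ [PySem.List.slice cmds (some st.2) (some p)], p + 1))
      (acc, d)
    = (acc ++ (pvRun cmds d pis).1, (pvRun cmds d pis).2) := by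
  induction pis generalizing acc d with
  | nil => simp [pvRun]
  | cons p rest ih => simp [pvRun, ih]

lemma run_snoc (cmds : List String) (d p : Int) (xs : List Int) :
    pvRun cmds d (xs ++ [p])
      = ((pvRun cmds d xs).1 ++ [PySem.List.slice cmds (some (pvRun cmds d xs).2) (some p)], p + 1) := by
  induction xs generalizing d with
  | nil => simp [pvRun]
  | cons q rest ih => simp [pvRun, ih]

-- the `rest[-1] + 1 if rest else 0` start seen right-to-left equals pvRun's final start
lemma head_run (cmds : List String) (r : List Int) :
    (match r.head? with | some q => q + 1 | none => 0) = (pvRun cmds 0 r.reverse).2 := by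
  induction r with
  | nil => simp [pvRun]
  | cons p rest ih => simp [List.reverse_cons, run_snoc]

-- B's loop over the reversed index list appends pvRun's inner slices in reverse order
lemma loopB_run (cmds : List String) (r : List Int) (segs : List (List String)) :
    pvLoopB cmds r segs = segs ++ ((pvRun cmds 0 r.reverse).1).reverse := by
  induction r generalizing segs with
  | nil => simp [pvLoopB, pvRun]
  | cons p rest ih =>
      simp only [pvLoopB, List.reverse_cons]
      rw [ih, run_snoc]
      simp [← head_run cmds rest]

lemma getLast?_eq_head_reverse (pis : List Int) : pis.getLast? = pis.reverse.head? := by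
  simp [List.head?_reverse]

theorem splitOnPipeIndexes_spec : Claim_equal_splitOnPipeIndexes := by
  intro pis cmds _
  unfold Spec_splitOnPipeIndexes splitOnPipeIndexes splitOnPipeIndexes_alt
  rw [foldA_eq_run]
  have h := head_run cmds pis.reverse
  rw [List.reverse_reverse, ← getLast?_eq_head_reverse] at h
  simp [loopB_run cmds pis.reverse, List.reverse_reverse, h]
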